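-- pv_equiv track=rewrite | github.com/Fossam40/bio2025-fosse | Homework1/plot_word_complexity.py | calculate_word_complexity
-- ===== SOURCE A (Python) =====
-- from collections import Counter
--
-- letters_to_num = {'A': 1, 'C': 2, 'T': 3, 'G': 4}
--
-- def calculate_word_complexity(inputs):
--     counts = [Counter() for i in range(29)]
--     current_read = [0] * 29
--     for i in range(len(inputs)):
--         for j in range(min(30, i+1),2, -1):
--             current_read[j-2] = current_read[j-3]*4 + letters_to_num[inputs[i]]
--             counts[j-2][current_read[j-2]]+=1
--         if(i>0):
--             current_read[0] = 4*letters_to_num[inputs[i-1]] + letters_to_num[inputs[i]]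
--             counts[0][current_read[0]]+=1
--     return [len(a) for a in counts]
-- ===== SOURCE B (Python) =====
-- letters_to_num = {'A': 1, 'C': 2, 'T': 3, 'G': 4}
--
-- def calculate_word_complexity(inputs):
--     n = len(inputs)
--     result = []
--     for k in range(2, 31):
--         seen = set()
--         for i in range(n - k + 1):
--             code = 0
--             for t in range(k):
--                 code = code * 4 + letters_to_num[inputs[i + t]]
--             seen.add(code)
--         result.append(len(seen))
--     return result
-- ===== Notes on version B (the rewrite author's own statement) =====
-- stated objective: simpler
-- what changed: A maintains 29 rolling codes and 29 Counters in one interleaved pass with a reversed inner range; B simply loops k = 2..30 and, per k, recomputes each k-mer's code from scratch into a set and appends the set's size.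
import Mathlib
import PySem

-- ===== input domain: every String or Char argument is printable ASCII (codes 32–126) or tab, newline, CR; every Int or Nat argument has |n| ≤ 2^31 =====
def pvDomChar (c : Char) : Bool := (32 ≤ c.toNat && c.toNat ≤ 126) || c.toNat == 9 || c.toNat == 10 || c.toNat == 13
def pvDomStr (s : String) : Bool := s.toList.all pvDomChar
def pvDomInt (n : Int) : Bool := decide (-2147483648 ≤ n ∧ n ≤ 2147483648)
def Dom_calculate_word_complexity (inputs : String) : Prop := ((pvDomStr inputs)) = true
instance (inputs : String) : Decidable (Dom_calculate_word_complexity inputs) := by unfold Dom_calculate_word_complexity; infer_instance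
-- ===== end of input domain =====

-- B replaces A's single interleaved rolling pass (29 rolling codes + 29 Counters) by a plain
-- per-length scan: for each k in 2..30 recompute every k-mer's code into a set (objective: simpler).


-- ===== PORT A =====
-- letters_to_num (shared module-level constant)
def pvLtn : PySem.Dict Char Int := PySem.Dict.ofList [('A',1),('C',2),('T',3),('G',4)]
-- letters_to_num[c]; the KeyError case (get? = none) is excluded by Pre_, default 0 outside it
def pvVal (c : Char) : Int := (PySem.Dict.get? pvLtn c).getD 0

-- one iteration of A's outer 'for i in range(len(inputs))' loop
def pvAStep (cs : List Char) (st : List (PySem.Dict Int Int) × List Int) (i : Nat) :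
    List (PySem.Dict Int Int) × List Int :=
  let st1 := (PySem.List.pyRange (min 30 ((i : Int) + 1)) 2 (-1)).foldl (fun st j =>
      let v := st.2.getD (j - 3).toNat 0 * 4 + pvVal (cs.getD i ' ')
      (st.1.set (j - 2).toNat ((st.1.getD (j - 2).toNat PySem.Dict.empty).modify v 0 (· + 1)),
       st.2.set (j - 2).toNat v)) st
  if i > 0 then
    let v := 4 * pvVal (cs.getD (i - 1) ' ') + pvVal (cs.getD i ' ')
    (st1.1.set 0 ((st1.1.getD 0 PySem.Dict.empty).modify v 0 (· + 1)), st1.2.set 0 v)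
  else st1

def calculate_word_complexity (inputs : String) : List Int :=
  let cs := inputs.toList
  let st := (List.range cs.length).foldl (pvAStep cs)
      (List.replicate 29 PySem.Dict.empty, List.replicate 29 (0 : Int))
  st.1.map (fun d => (PySem.Dict.size d : Int))

-- ===== PORT B =====
-- code of the k-mer starting at i: fold code*4 + letters_to_num[inputs[i+t]] over t in range(k)
def pvCode (cs : List Char) (k : Int) (i : Int) : Int :=
  (PySem.List.pyRange 0 k 1).foldl (fun c t => c * 4 + pvVal (cs.getD (i + t).toNat ' ')) 0

def calculate_word_complexity_alt (inputs : String) : List Int :=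
  let cs := inputs.toList
  let n : Int := (cs.length : Int)
  (PySem.List.pyRange 2 31 1).foldl (fun res k =>
    let seen := (PySem.List.pyRange 0 (n - k + 1) 1).foldl
      (fun s i => PySem.Set.add s (pvCode cs k i)) PySem.Set.empty
    res ++ [(seen.length : Int)]) []

-- ===== PRECONDITION & SPEC =====
-- Pre_ excludes exactly the inputs where Python A raises KeyError (a non-ACTG character while
-- len(inputs) >= 2, so that some 2-mer is formed); B raises KeyError there as well.
def Pre_calculate_word_complexity (inputs : String) : Prop :=
  inputs.toList.length ≤ 1 ∨ (inputs.toList.all (fun c => c ∈ (['A', 'C', 'T', 'G'] : List Char))) = true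
instance (inputs : String) : Decidable (Pre_calculate_word_complexity inputs) := by
  unfold Pre_calculate_word_complexity; infer_instance
def pvWitness_calculate_word_complexity : String := "ACTGGA"

def Spec_calculate_word_complexity (inputs : String) (out : List Int) : Prop :=
  out = calculate_word_complexity_alt inputs
instance (inputs : String) (out : List Int) : Decidable (Spec_calculate_word_complexity inputs out) := by
  unfold Spec_calculate_word_complexity; infer_instance

-- ===== CLAIM (what is proved, stated in full; the proofs are below) =====
def Claim_equal_calculate_word_complexity : Prop := ∀ (inputs : String), Dom_calculate_word_complexity inputs → Pre_calculate_word_complexity inputs → Spec_calculate_word_complexity inputs (calculate_word_complexity inputs)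

-- ===== LEMMAS AND PROOFS =====

-- code of the window of length k starting at s (proof-side, Nat indices)
def pvW (cs : List Char) (s k : Nat) : Int :=
  (List.range k).foldl (fun c t => c * 4 + pvVal (cs.getD (s + t) ' ')) 0

-- codes of all (m+2)-mers inside the prefix of length p, in order of start position
def pvCodes (cs : List Char) (m p : Nat) : List Int :=
  (List.range (p - (m + 1))).map (fun s => pvW cs s (m + 2))


theorem pvW_succ (cs : List Char) (s k : Nat) :
    pvW cs s (k + 1) = pvW cs s k * 4 + pvVal (cs.getD (s + k) ' ') := by
  simp [pvW, List.range_succ]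

theorem pvW_two (cs : List Char) (s : Nat) :
    pvW cs s 2 = 4 * pvVal (cs.getD s ' ') + pvVal (cs.getD (s + 1) ' ') := by
  simp [pvW, List.range_succ]; ring

theorem pvCodes_succ (cs : List Char) (m p : Nat) (h : m + 1 ≤ p) :
    pvCodes cs m (p + 1) = pvCodes cs m p ++ [pvW cs (p - (m + 1)) (m + 2)] := by
  unfold pvCodes
  have : p + 1 - (m + 1) = (p - (m + 1)) + 1 := by omega
  rw [this, List.range_succ, List.map_append]
  rfl

theorem pvCodes_stable (cs : List Char) (m p : Nat) (h : p ≤ m) :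
    pvCodes cs m (p + 1) = pvCodes cs m p := by
  unfold pvCodes
  have h1 : p + 1 - (m + 1) = 0 := by omega
  have h2 : p - (m + 1) = 0 := by omega
  rw [h1, h2]

theorem pvRangeDown (b : Int) (h : 2 < b) :
    PySem.List.pyRange b 2 (-1) = b :: PySem.List.pyRange (b - 1) 2 (-1) := by
  by_cases hb2 : (2:Int) < b - 1
  · unfold PySem.List.pyRange
    have h0 : ¬ ((-1 : Int) = 0) := by decide
    have h1 : ¬ (0 < (-1:Int)) := by decide
    simp only [if_neg h0, if_neg h1]
    rw [if_pos h, if_pos hb2]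
    have e1 : ((b - 2 + -(-1) - 1) / -(-1)) = (b-2) := by norm_num
    have e2 : ((b - 1 - 2 + -(-1) - 1) / -(-1)) = (b-3) := by
      rw [show b - 1 - 2 + -(-1) - 1 = b - 3 by ring]; norm_num
    rw [e1, e2]
    have : (b-2).toNat = (b-3).toNat + 1 := by omega
    rw [this, List.range_succ_eq_map, List.map_cons, List.map_map]
    refine congrArg₂ List.cons (by push_cast; ring) (List.map_congr_left ?_)
    intro k hk; simp only [Function.comp_apply]; push_cast; ring
  · have hb3 : b = 3 := by omega
    subst hb3; decide

theorem pvRangeDown_nil (b : Int) (h : b ≤ 2) : PySem.List.pyRange b 2 (-1) = [] := by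
  unfold PySem.List.pyRange
  have h0 : ¬ ((-1 : Int) = 0) := by decide
  have h1 : ¬ (0 < (-1:Int)) := by decide
  simp only [if_neg h0, if_neg h1]
  rw [if_neg (by omega)]
  simp

theorem pvGetD_set {α : Type} (l : List α) (n : Nat) (a : α) (m : Nat) (d : α) (h : n < l.length) :
    (l.set n a).getD m d = if m = n then a else l.getD m d := by
  simp only [List.getD_eq_getElem?_getD, List.getElem?_set]
  by_cases hm : m = n
  · subst hm; rw [if_pos rfl, if_pos rfl, if_pos h]; rfl
  · rw [if_neg (fun e => hm e.symm), if_neg hm]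

-- the inner 'for j in range(min(30,i+1),2,-1)' loop at outer index i = p
theorem pvInner (cs : List Char) (p d : Nat) (hd : d + 2 ≤ p + 1) (hd30 : d ≤ 28)
    (st : List (PySem.Dict Int Int) × List Int)
    (h1 : st.1.length = 29) (h2 : st.2.length = 29)
    (hc : ∀ m, m < 29 → m ≤ d → st.1.getD m PySem.Dict.empty = PySem.Dict.counter (pvCodes cs m p))
    (hr : ∀ m, m < 29 → m ≤ d → m + 2 ≤ p → st.2.getD m 0 = pvW cs (p - (m + 2)) (m + 2)) :
    let st' := (PySem.List.pyRange ((d : Int) + 2) 2 (-1)).foldl (fun st j =>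
      let v := st.2.getD (j - 3).toNat 0 * 4 + pvVal (cs.getD p ' ')
      (st.1.set (j - 2).toNat ((st.1.getD (j - 2).toNat PySem.Dict.empty).modify v 0 (· + 1)),
       st.2.set (j - 2).toNat v)) st
    st'.1.length = 29 ∧ st'.2.length = 29 ∧
    (∀ m, m < 29 → st'.1.getD m PySem.Dict.empty =
        if 1 ≤ m ∧ m ≤ d then PySem.Dict.counter (pvCodes cs m (p + 1)) else st.1.getD m PySem.Dict.empty) ∧
    (∀ m, m < 29 → st'.2.getD m 0 =
        if 1 ≤ m ∧ m ≤ d then pvW cs (p + 1 - (m + 2)) (m + 2) else st.2.getD m 0) := by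
  induction d generalizing st with
  | zero =>
    rw [pvRangeDown_nil _ (by norm_num)]
    simp only [List.foldl_nil]
    refine ⟨h1, h2, ?_, ?_⟩ <;> (intro m hm; rw [if_neg (by omega)])
  | succ d ih =>
    have hcast : ((d + 1 : Nat) : Int) + 2 = ((d : Nat) : Int) + 3 := by push_cast; ring
    rw [hcast, pvRangeDown _ (by omega),
      show ((d : Nat) : Int) + 3 - 1 = ((d : Nat) : Int) + 2 from by ring, List.foldl_cons]
    have e3 : (((d : Nat) : Int) + 3 - 3).toNat = d := by omega
    have e2 : (((d : Nat) : Int) + 3 - 2).toNat = d + 1 := by omega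
    simp only [e3, e2]
    set v := st.2.getD d 0 * 4 + pvVal (cs.getD p ' ') with hvdef
    have hvald : st.2.getD d 0 = pvW cs (p - (d + 2)) (d + 2) :=
      hr d (by omega) (by omega) (by omega)
    have hv : v = pvW cs (p - (d + 2)) (d + 3) := by
      have h' := pvW_succ cs (p - (d + 2)) (d + 2)
      rw [show (p - (d + 2)) + (d + 2) = p from by omega] at h'
      rw [hvdef, hvald, show d + 3 = (d + 2) + 1 from rfl]
      exact h'.symm
    set stm : List (PySem.Dict Int Int) × List Int :=
      (st.1.set (d + 1) ((st.1.getD (d + 1) PySem.Dict.empty).modify v 0 (· + 1)),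
       st.2.set (d + 1) v) with hstm
    have hm1 : stm.1.length = 29 := by rw [hstm]; simpa using h1
    have hm2 : stm.2.length = 29 := by rw [hstm]; simpa using h2
    have hcnt : stm.1.getD (d + 1) PySem.Dict.empty = PySem.Dict.counter (pvCodes cs (d + 1) (p + 1)) := by
      rw [hstm]
      show (st.1.set _ _).getD _ _ = _
      rw [pvGetD_set _ _ _ _ _ (by omega), if_pos rfl,
        hc (d + 1) (by omega) (le_refl _),
        pvCodes_succ cs (d + 1) p (by omega), PySem.Dict.counter_append_singleton, hv]
    have hcrm : stm.2.getD (d + 1) 0 = pvW cs (p + 1 - (d + 3)) (d + 3) := by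
      rw [hstm]
      show (st.2.set _ _).getD _ _ = _
      rw [pvGetD_set _ _ _ _ _ (by omega), if_pos rfl, hv]
      congr 1; omega
    obtain ⟨k1, k2, k3, k4⟩ := ih (by omega) (by omega) stm hm1 hm2
      (by
        intro m hm hmd
        show (st.1.set _ _).getD _ _ = _
        rw [pvGetD_set _ _ _ _ _ (by omega), if_neg (by omega)]
        exact hc m hm (by omega))
      (by
        intro m hm hmd hmp
        show (st.2.set _ _).getD _ _ = _
        rw [pvGetD_set _ _ _ _ _ (by omega), if_neg (by omega)]
        exact hr m hm (by omega) hmp)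
    refine ⟨k1, k2, ?_, ?_⟩
    · intro m hm
      rw [k3 m hm]
      by_cases hmd : 1 ≤ m ∧ m ≤ d
      · rw [if_pos hmd, if_pos (by omega)]
      · rw [if_neg hmd]
        by_cases hme : m = d + 1
        · subst hme
          rw [if_pos (by omega)]
          exact hcnt
        · rw [if_neg (by omega), hstm]
          show (st.1.set _ _).getD _ _ = _
          rw [pvGetD_set _ _ _ _ _ (by omega), if_neg (by omega)]
    · intro m hm
      rw [k4 m hm]
      by_cases hmd : 1 ≤ m ∧ m ≤ d
      · rw [if_pos hmd, if_pos (by omega)]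
      · rw [if_neg hmd]
        by_cases hme : m = d + 1
        · subst hme
          rw [if_pos (by omega)]
          exact hcrm
        · rw [if_neg (by omega), hstm]
          show (st.2.set _ _).getD _ _ = _
          rw [pvGetD_set _ _ _ _ _ (by omega), if_neg (by omega)]

-- invariant of A's outer loop
theorem pvOuter (cs : List Char) (p : Nat) :
    let st := (List.range p).foldl (pvAStep cs)
        (List.replicate 29 PySem.Dict.empty, List.replicate 29 (0 : Int))
    st.1.length = 29 ∧ st.2.length = 29 ∧
    (∀ m, m < 29 → st.1.getD m PySem.Dict.empty = PySem.Dict.counter (pvCodes cs m p)) ∧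
    (∀ m, m < 29 → m + 2 ≤ p → st.2.getD m 0 = pvW cs (p - (m + 2)) (m + 2)) := by
  induction p with
  | zero =>
    refine ⟨by simp, by simp, ?_, ?_⟩
    · intro m hm
      have : pvCodes cs m 0 = [] := by simp [pvCodes]
      rw [this]
      show (List.replicate 29 PySem.Dict.empty).getD m PySem.Dict.empty = _
      rw [List.getD_eq_getElem?_getD, List.getElem?_replicate]
      simp [hm]
      rfl
    · intro m hm h2; omega
  | succ p ih =>
    rw [List.range_succ, List.foldl_append, List.foldl_cons, List.foldl_nil]
    obtain ⟨i1, i2, i3, i4⟩ := ih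
    set st := (List.range p).foldl (pvAStep cs)
        (List.replicate 29 PySem.Dict.empty, List.replicate 29 (0 : Int)) with hst
    by_cases hp : p = 0
    · subst hp
      unfold pvAStep
      rw [pvRangeDown_nil _ (by norm_num), if_neg (by omega)]
      simp only [List.foldl_nil]
      refine ⟨i1, i2, ?_, ?_⟩
      · intro m hm
        rw [i3 m hm, pvCodes_stable cs m 0 (by omega)]
      · intro m hm h2; omega
    · set d := min 28 (p - 1) with hd
      have hmin : min 30 ((p : Int) + 1) = ((d : Nat) : Int) + 2 := by omega
      unfold pvAStep
      rw [hmin, if_pos (by omega)]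
      obtain ⟨k1, k2, k3, k4⟩ := pvInner cs p d (by omega) (by omega) st i1 i2
        (fun m hm _ => i3 m hm) (fun m hm _ hp2 => i4 m hm hp2)
      set st1 := (PySem.List.pyRange (((d : Nat) : Int) + 2) 2 (-1)).foldl (fun st j =>
        let v := st.2.getD (j - 3).toNat 0 * 4 + pvVal (cs.getD p ' ')
        (st.1.set (j - 2).toNat ((st.1.getD (j - 2).toNat PySem.Dict.empty).modify v 0 (· + 1)),
         st.2.set (j - 2).toNat v)) st with hst1
      set v0 := 4 * pvVal (cs.getD (p - 1) ' ') + pvVal (cs.getD p ' ') with hv0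
      have hv0w : v0 = pvW cs (p - 1) 2 := by
        rw [pvW_two, show (p - 1) + 1 = p from by omega]
      refine ⟨by simpa using k1, by simpa using k2, ?_, ?_⟩
      · intro m hm
        show (st1.1.set 0 _).getD m _ = _
        rw [pvGetD_set _ _ _ _ _ (by omega)]
        by_cases hm0 : m = 0
        · subst hm0
          rw [if_pos rfl, k3 0 (by omega), if_neg (by omega), i3 0 (by omega),
            pvCodes_succ cs 0 p (by omega), PySem.Dict.counter_append_singleton, hv0w]
        · rw [if_neg hm0, k3 m hm]
          by_cases hmd : 1 ≤ m ∧ m ≤ d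
          · rw [if_pos hmd]
          · rw [if_neg hmd, i3 m hm, pvCodes_stable cs m p (by omega)]
      · intro m hm h2
        show (st1.2.set 0 _).getD m _ = _
        rw [pvGetD_set _ _ _ _ _ (by omega)]
        by_cases hm0 : m = 0
        · subst hm0
          rw [if_pos rfl, hv0w, show p + 1 - (0 + 2) = p - 1 from by omega]
        · rw [if_neg hm0, k4 m hm, if_pos (by omega)]

theorem pvCode_eq (cs : List Char) (k s : Nat) :
    pvCode cs (k : Int) (s : Int) = pvW cs s k := by
  unfold pvCode pvW
  rw [PySem.List.pyRange_zero_natCast, List.foldl_map]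
  apply PySem.List.foldl_congr_mem
  intro acc x hx
  have : ((s : Int) + (x : Int)).toNat = s + x := by omega
  rw [this]

theorem pvB_entry (cs : List Char) (k : Nat) :
    ((PySem.List.pyRange 0 ((cs.length : Int) - (k : Int) + 1) 1).foldl
      (fun s i => PySem.Set.add s (pvCode cs (k : Int) i)) PySem.Set.empty)
    = PySem.Set.ofList ((List.range (cs.length + 1 - k)).map (fun s => pvW cs s k)) := by
  have hr : PySem.List.pyRange 0 ((cs.length : Int) - (k : Int) + 1) 1
      = (List.range (cs.length + 1 - k)).map (fun s : Nat => (s : Int)) := by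
    by_cases hk : k ≤ cs.length + 1
    · have : (cs.length : Int) - (k : Int) + 1 = ((cs.length + 1 - k : Nat) : Int) := by omega
      rw [this]; exact PySem.List.pyRange_zero_natCast _
    · have h0 : cs.length + 1 - k = 0 := by omega
      rw [h0, PySem.List.pyRange_of_pos _ _ (by norm_num : (0:Int) < 1), if_neg (by omega)]
      simp
  rw [hr, List.foldl_map]
  have hcong : ∀ (s : PySem.Set Int), ∀ x ∈ List.range (cs.length + 1 - k),
      PySem.Set.add s (pvCode cs (k:Int) (x:Int)) = PySem.Set.add s (pvW cs x k) := by
    intro s x hx; rw [pvCode_eq]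
  rw [PySem.List.foldl_congr_mem _ _ _ _ hcong, ← PySem.Set.update_map_eq_foldl_add,
    PySem.Set.update_empty]

theorem pvRange231 :
    PySem.List.pyRange 2 31 1 = (List.range 29).map (fun m : Nat => ((m : Int) + 2)) := by
  rw [PySem.List.pyRange_of_pos _ _ (by norm_num : (0:Int) < 1), if_pos (by norm_num)]
  norm_num
  exact List.map_congr_left (fun k hk => by ring)

theorem pvMain (cs : List Char) :
    ((List.range cs.length).foldl (pvAStep cs)
        (List.replicate 29 PySem.Dict.empty, List.replicate 29 (0 : Int))).1.map
      (fun d => (PySem.Dict.size d : Int))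
    = (PySem.List.pyRange 2 31 1).foldl (fun res k =>
        let seen := (PySem.List.pyRange 0 ((cs.length : Int) - k + 1) 1).foldl
          (fun s i => PySem.Set.add s (pvCode cs k i)) PySem.Set.empty
        res ++ [(seen.length : Int)]) [] := by
  obtain ⟨i1, i2, i3, _⟩ := pvOuter cs cs.length
  set st := (List.range cs.length).foldl (pvAStep cs)
      (List.replicate 29 PySem.Dict.empty, List.replicate 29 (0 : Int)) with hst
  have hB : (PySem.List.pyRange 2 31 1).foldl (fun res k =>
      let seen := (PySem.List.pyRange 0 ((cs.length : Int) - k + 1) 1).foldl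
        (fun s i => PySem.Set.add s (pvCode cs k i)) PySem.Set.empty
      res ++ [(seen.length : Int)]) []
      = (PySem.List.pyRange 2 31 1).map (fun k =>
        (((PySem.List.pyRange 0 ((cs.length : Int) - k + 1) 1).foldl
        (fun s i => PySem.Set.add s (pvCode cs k i)) PySem.Set.empty).length : Int)) := by
    rw [PySem.List.foldl_append_singleton_eq_map]
    rfl
  rw [hB, pvRange231, List.map_map]
  apply List.ext_getElem
  · rw [List.length_map, List.length_map, i1, List.length_range]
  · intro m hm1 hm2
    rw [List.getElem_map, List.getElem_map, Function.comp_apply, List.getElem_range]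
    have hm29 : m < 29 := by rw [List.length_map, i1] at hm1; exact hm1
    have hA : st.1[m] = PySem.Dict.counter (pvCodes cs m cs.length) := by
      rw [← List.getD_eq_getElem st.1 PySem.Dict.empty, i3 m hm29]
    rw [hA]
    have hk : ((m : Int) + 2) = (((m + 2 : Nat)) : Int) := by push_cast; ring
    rw [hk, pvB_entry cs (m + 2)]
    have hsz : (PySem.Dict.counter (pvCodes cs m cs.length)).size
        = (PySem.Set.ofList (pvCodes cs m cs.length)).length := by
      rw [← PySem.Dict.keys_counter]
      simp [PySem.Dict.keys, PySem.Dict.size]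
    rw [hsz]
    have harg : pvCodes cs m cs.length
        = (List.range (cs.length + 1 - (m + 2))).map (fun s => pvW cs s (m + 2)) := by
      unfold pvCodes
      rw [show cs.length - (m + 1) = cs.length + 1 - (m + 2) from by omega]
    rw [harg]

-- ===== VERDICT (by name: the statement is the Claim_ definition above) =====
theorem calculate_word_complexity_spec : Claim_equal_calculate_word_complexity := by
  intro inputs _ _
  exact pvMain inputs.toList
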